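-- pv_equiv track=rewrite | github.com/anaslari23/AI-EDA | backend/app/ai/intent_parser.py | _detect_data_logging
-- ===== SOURCE A (Python) =====
-- def _detect_data_logging(text: str) -> bool:
--     """Detect if data logging is required."""
--     keywords = [
--         "log",
--         "logging",
--         "record",
--         "store",
--         "sd card",
--         "flash",
--         "eeprom",
--         "save data",
--     ]
--     text_lower = text.lower()
--     return any(kw in text_lower for kw in keywords)
-- ===== SOURCE B (Python) =====
-- _KEYWORDS = (
--     "log",
--     "logging",
--     "record",
--     "store",
--     "sd card",
--     "flash",
--     "eeprom",
--     "save data",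
-- )
--
--
-- def _detect_data_logging(text: str) -> bool:
--     """Detect if data logging is required (single left-to-right scan)."""
--     t = text.lower()
--     for i in range(len(t)):
--         for kw in _KEYWORDS:
--             if t.startswith(kw, i):
--                 return True
--     return False
-- ===== Notes on version B (the rewrite author's own statement) =====
-- stated objective: alternative
-- what changed: Replaces A's k independent substring-membership scans with one left-to-right scan over the text that checks at each position whether any keyword starts there.
import Mathlib
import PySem

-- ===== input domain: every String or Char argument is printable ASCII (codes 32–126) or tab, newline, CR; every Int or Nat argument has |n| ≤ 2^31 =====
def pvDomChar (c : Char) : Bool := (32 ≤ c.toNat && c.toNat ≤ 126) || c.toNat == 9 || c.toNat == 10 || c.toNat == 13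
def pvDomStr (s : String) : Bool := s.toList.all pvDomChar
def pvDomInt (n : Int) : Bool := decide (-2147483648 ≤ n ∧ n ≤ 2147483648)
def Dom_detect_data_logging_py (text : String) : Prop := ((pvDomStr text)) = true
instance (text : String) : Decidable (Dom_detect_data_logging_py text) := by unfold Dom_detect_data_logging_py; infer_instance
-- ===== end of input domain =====

-- B replaces A's k independent substring scans by one left-to-right scan checking each
-- position for a keyword start (objective: alternative; same asymptotic cost).

-- ===== PORT A =====
-- A's keyword list, in A's order.
def pvKeywords : List String :=
  ["log", "logging", "record", "store", "sd card", "flash", "eeprom", "save data"]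

-- 'any(kw in text_lower for kw in keywords)'
def detect_data_logging_py (text : String) : Bool :=
  let text_lower := PySem.Str.lower text
  pvKeywords.any (fun kw => PySem.Str.isIn kw text_lower)

-- ===== PORT B =====
-- B's inner loop: does some keyword start at the head of this suffix?
def pvKwAt (s : List Char) : Bool :=
  pvKeywords.any (fun kw => PySem.Chars.startswith s kw.toList)

-- B's outer loop over positions i = 0,1,… : recursion over the suffixes of the text.
def pvScan : List Char → Bool
  | [] => false
  | c :: rest => pvKwAt (c :: rest) || pvScan rest

def detect_data_logging_py_alt (text : String) : Bool :=
  pvScan (PySem.Chars.lower text.toList)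

-- ===== PRECONDITION & SPEC =====
def Spec_detect_data_logging_py (text : String) (out : Bool) : Prop := out = detect_data_logging_py_alt text
instance (text : String) (out : Bool) : Decidable (Spec_detect_data_logging_py text out) := by unfold Spec_detect_data_logging_py; infer_instance

-- ===== CLAIM (what is proved, stated in full; the proofs are below) =====
def Claim_equal_detect_data_logging_py : Prop := ∀ (text : String), Dom_detect_data_logging_py text → Spec_detect_data_logging_py text (detect_data_logging_py text)

-- ===== LEMMAS AND PROOFS =====

-- The scan finds a match iff some (nonempty) keyword is a prefix of some suffix.
theorem pvScan_iff (t : List Char) :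
    pvScan t = true ↔ ∃ kw ∈ pvKeywords, ∃ j, kw.toList <+: t.drop j := by
  induction t with
  | nil =>
    constructor
    · intro h; simp [pvScan] at h
    rintro ⟨kw, hkw, j, hpre⟩
    have : kw.toList = [] := List.prefix_nil.mp (by simpa using hpre)
    fin_cases hkw <;> simp_all
  | cons c rest ih =>
    simp only [pvScan, Bool.or_eq_true, ih, pvKwAt, List.any_eq_true]
    constructor
    · rintro (⟨kw, hkw, hpre⟩ | ⟨kw, hkw, j, hpre⟩)
      · exact ⟨kw, hkw, 0, by simpa [PySem.Chars.startswith_iff] using hpre⟩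
      · exact ⟨kw, hkw, j + 1, by simpa using hpre⟩
    · rintro ⟨kw, hkw, j, hpre⟩
      cases j with
      | zero => exact Or.inl ⟨kw, hkw, by simpa [PySem.Chars.startswith_iff] using hpre⟩
      | succ n => exact Or.inr ⟨kw, hkw, n, by simpa using hpre⟩

-- ===== VERDICT (by name: the statement is the Claim_ definition above) =====
theorem detect_data_logging_py_spec : Claim_equal_detect_data_logging_py := by
  intro text _
  unfold Spec_detect_data_logging_py detect_data_logging_py detect_data_logging_py_alt
  rw [Bool.eq_iff_iff]
  simp only [List.any_eq_true, PySem.Str.isIn_eq, PySem.Str.toList_lower, pvScan_iff,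
    PySem.Chars.exists_prefix_drop_iff_isIn]
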